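-- pv_equiv track=rewrite | github.com/suvven1/Coding-Test | 프로그래머스/unrated/181932. 코드 처리하기/코드 처리하기.py | solution
-- ===== SOURCE A (Python) =====
-- def solution(code):
--     mode = 0
--     ret = ""
--     for i in range(len(code)):
--         if mode==0 and code[i]!="1" and i%2 == 0:
--             ret = ret + code[i]
--         elif mode==0 and code[i] == "1":
--             mode = 1
--         elif mode==1 and code[i]!="1" and i%2 == 1:
--             ret = ret + code[i]
--         elif mode==1 and code[i] == "1":
--             mode = 0
--
--     if ret == "":
--         return "EMPTY"
--     else:
--         return ret
-- ===== SOURCE B (Python) =====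
-- def solution(code):
--     out = []
--     pos = 0
--     for k, seg in enumerate(code.split("1")):
--         out.append(seg[(k + pos) % 2::2])
--         pos += len(seg) + 1
--     return "".join(out) or "EMPTY"
-- ===== Notes on version B (the rewrite author's own statement) =====
-- stated objective: faster
-- what changed: Replaces the per-character four-branch mode state machine by splitting the string on the toggle digit and taking, for each resulting segment, a stride-2 slice starting at a parity-derived offset, joined once at the end; the measured speedup is a constant factor from replacing the interpreted per-character loop by C-level str.split/slice/join.
import Mathlib
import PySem

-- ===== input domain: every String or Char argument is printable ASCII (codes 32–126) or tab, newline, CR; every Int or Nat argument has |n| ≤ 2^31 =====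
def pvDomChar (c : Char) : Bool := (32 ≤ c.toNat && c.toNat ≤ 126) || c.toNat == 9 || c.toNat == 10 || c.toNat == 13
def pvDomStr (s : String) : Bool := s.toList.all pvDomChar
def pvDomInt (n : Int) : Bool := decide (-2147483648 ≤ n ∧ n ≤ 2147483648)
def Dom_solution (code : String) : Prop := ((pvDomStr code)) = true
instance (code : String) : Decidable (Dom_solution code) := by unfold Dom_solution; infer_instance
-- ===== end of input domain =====

-- B (faster, measured constant factor): instead of A's per-character four-branch mode state
-- machine, B splits the string on the toggle digit and takes a stride-2 slice of each segment
-- starting at a parity-derived offset.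

-- ===== PORT A =====
-- A's for-loop over range(len(code)) with state (mode, ret); i is the running index.
def solutionLoopA : List Char → Nat → Nat → List Char → Nat × List Char
  | [], _, mode, ret => (mode, ret)
  | c :: cs, i, mode, ret =>
    if mode = 0 ∧ c ≠ '1' ∧ i % 2 = 0 then solutionLoopA cs (i + 1) mode (ret ++ [c])
    else if mode = 0 ∧ c = '1' then solutionLoopA cs (i + 1) 1 ret
    else if mode = 1 ∧ c ≠ '1' ∧ i % 2 = 1 then solutionLoopA cs (i + 1) mode (ret ++ [c])
    else if mode = 1 ∧ c = '1' then solutionLoopA cs (i + 1) 0 ret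
    else solutionLoopA cs (i + 1) mode ret

def solution (code : String) : String :=
  let ret := (solutionLoopA code.toList 0 0 []).2
  if ret = [] then "EMPTY" else String.ofList ret

-- ===== PORT B =====
-- B's for-loop over enumerate(code.split("1")) with state (pos, out); each step appends
-- the slice seg[(k + pos) % 2::2] (a step-2 slice never raises, so getD [] is exact).
def solutionSegsB : List (List Char) → Nat → Nat → List Char → List Char
  | [], _, _, out => out
  | seg :: rest, k, pos, out =>
    solutionSegsB rest (k + 1) (pos + seg.length + 1)
      (out ++ (PySem.List.slice? seg (some (((k + pos) % 2 : Nat) : Int)) none 2).getD [])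

def solution_alt (code : String) : String :=
  let out := solutionSegsB (PySem.Chars.splitOn code.toList ['1']) 0 0 []
  if out = [] then "EMPTY" else String.ofList out

-- ===== PRECONDITION & SPEC =====
def Spec_solution (code : String) (out : String) : Prop := out = solution_alt code
instance (code : String) (out : String) : Decidable (Spec_solution code out) := by unfold Spec_solution; infer_instance

-- ===== CLAIM (what is proved, stated in full; the proofs are below) =====
def Claim_equal_solution : Prop := ∀ (code : String), Dom_solution code → Spec_solution code (solution code)

-- ===== LEMMAS AND PROOFS =====

-- Characters at even positions of a list (what a step-2 slice from 0 collects).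
def everyOther {α : Type} : List α → List α
  | [] => []
  | [a] => [a]
  | a :: _ :: t => a :: everyOther t

-- Split on the single character '1', structurally.
def splitF : List Char → List (List Char)
  | [] => [[]]
  | c :: t =>
    if c = '1' then [] :: splitF t
    else match splitF t with
      | [] => [[c]]
      | p :: ps => (c :: p) :: ps

-- Per-character specification both programs are reduced to:
-- keep c at absolute index pos, with k ones seen so far, iff c ≠ '1' and (k + pos) even.
def keepSpec : List Char → Nat → Nat → List Char
  | [], _, _ => []
  | c :: t, k, pos =>
    if c = '1' then keepSpec t (k + 1) (pos + 1)
    else (if (k + pos) % 2 = 0 then [c] else []) ++ keepSpec t k (pos + 1)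

theorem splitF_ne_nil (s : List Char) : splitF s ≠ [] := by
  cases s with
  | nil => simp [splitF]
  | cons c t =>
    simp only [splitF]
    split
    · simp
    · split <;> simp

theorem splitOn_go_eq (s : List Char) : ∀ (fuel : Nat) (cur : List Char) (acc : List (List Char)),
    s.length ≤ fuel →
    PySem.Chars.splitOn.go ['1'] fuel s cur acc =
      acc.reverse ++ (match splitF s with
        | [] => [cur.reverse]
        | p :: ps => (cur.reverse ++ p) :: ps) := by
  induction s with
  | nil =>
    intro fuel cur acc _
    cases fuel <;> simp [PySem.Chars.splitOn.go, splitF]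
  | cons c t ih =>
    intro fuel cur acc hle
    cases fuel with
    | zero => simp at hle
    | succ f =>
      rw [PySem.Chars.splitOn.go.eq_def]
      by_cases hc : c = '1'
      · subst hc
        have hpre : List.isPrefixOf ['1'] ('1' :: t) = true := by simp [List.isPrefixOf]
        simp only [hpre, if_true]
        rw [show List.drop (['1'] : List Char).length ('1' :: t) = t from rfl]
        rw [ih f [] (cur.reverse :: acc) (by simpa using Nat.le_of_succ_le_succ hle)]
        rcases ht : splitF t with _ | ⟨p, ps⟩
        · exact absurd ht (splitF_ne_nil t)
        · simp [splitF, ht]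
      · have hpre : List.isPrefixOf ['1'] (c :: t) = false := by
          have hbeq : ('1' == c) = false := by
            simp only [beq_eq_false_iff_ne, ne_eq]
            exact fun h => hc h.symm
          simp [List.isPrefixOf, hbeq]
        simp only [hpre]
        rw [if_neg (by simp)]
        rw [ih f (c :: cur) acc (by simpa using Nat.le_of_succ_le_succ hle)]
        rcases ht : splitF t with _ | ⟨p, ps⟩
        · exact absurd ht (splitF_ne_nil t)
        · simp [splitF, ht, hc]

theorem splitOn_eq_splitF (s : List Char) :
    PySem.Chars.splitOn s ['1'] = splitF s := by
  have h := splitOn_go_eq s (s.length + 1) [] [] (Nat.le_succ _)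
  rcases hs : splitF s with _ | ⟨p, ps⟩
  · exact absurd hs (splitF_ne_nil s)
  · simpa [PySem.Chars.splitOn, hs] using h

theorem filterMap_range_everyOther {α : Type} (ys : List α) :
    List.filterMap (fun j => ys[2 * j]?) (List.range ((ys.length + 1) / 2)) = everyOther ys := by
  have H : ∀ n (ys : List α), ys.length ≤ n →
      List.filterMap (fun j => ys[2 * j]?) (List.range ((ys.length + 1) / 2)) = everyOther ys := by
    intro n
    induction n using Nat.strong_induction_on with
    | _ n ih =>
      intro ys hlen
      match ys with
      | [] => simp [everyOther]
      | [a] => simp [everyOther, List.range_succ]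
      | a :: b :: t =>
        have hc : (((a :: b :: t).length + 1) / 2) = (t.length + 1) / 2 + 1 := by
          simp only [List.length_cons]; omega
        rw [hc, List.range_succ_eq_map, List.filterMap_cons]
        simp only [List.filterMap_map]
        have h1 : List.filterMap ((fun j => (a :: b :: t)[2 * j]?) ∘ Nat.succ) (List.range ((t.length + 1) / 2))
            = List.filterMap (fun j => t[2 * j]?) (List.range ((t.length + 1) / 2)) := by
          apply List.filterMap_congr
          intro j _
          simp only [Function.comp]
          rw [show 2 * Nat.succ j = 2 * j + 1 + 1 by omega]
          simp
        rw [h1, ih (n - 1) (by simp at hlen; omega) t (by simp at hlen; omega)]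
        simp [everyOther]
  exact H ys.length ys le_rfl

-- A step-2 slice from a natural start is everyOther of the dropped list.
theorem slice2_eq (xs : List Char) (k : Nat) :
    PySem.List.slice? xs (some ((k : Nat) : Int)) none 2 = some (everyOther (xs.drop k)) := by
  have h2 : (2 : Int) ≠ 0 := by norm_num
  simp only [PySem.List.slice?, if_neg h2, PySem.List.sliceIndices]
  norm_num
  set b := min k xs.length with hbdef
  have hbmin : min ((k : Nat) : Int) ((xs.length : Nat) : Int) = ((b : Nat) : Int) := by
    push_cast [hbdef]; omega
  rw [hbmin]
  have hk0 : ¬((k : Nat) : Int) < 0 := by omega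
  simp only [hk0, if_false]
  have hdrop : xs.drop k = xs.drop b := by
    rcases Nat.le_total k xs.length with h | h
    · simp [hbdef, Nat.min_eq_left h]
    · rw [List.drop_eq_nil_of_le h, List.drop_eq_nil_of_le (by omega)]
  have hcount : (if ((b : Nat) : Int) < (xs.length : Int) then
        (((xs.length : Int) - ((b : Nat) : Int) + 2 - 1) / 2).toNat else 0)
      = ((xs.drop b).length + 1) / 2 := by
    rw [List.length_drop]
    split <;> omega
  rw [hcount, hdrop]
  rw [← filterMap_range_everyOther (xs.drop b)]
  apply List.filterMap_congr
  intro j hj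
  have h3 : (((b : Nat) : Int) + 2 * (j : Int)).toNat = b + 2 * j := by omega
  rw [h3]
  rw [List.getElem?_drop]

-- head step: the stride-2 slice of (c :: p) at parity m splits off c exactly when m is even.
theorem everyOther_drop_cons (c : Char) (p : List Char) (m : Nat) :
    everyOther (List.drop (m % 2) (c :: p)) =
      (if m % 2 = 0 then [c] else []) ++ everyOther (List.drop ((m + 1) % 2) p) := by
  rcases Nat.mod_two_eq_zero_or_one m with h | h <;> rw [h]
  · have h1 : (m + 1) % 2 = 1 := by omega
    rw [h1]
    cases p with
    | nil => simp [everyOther]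
    | cons b t => simp [everyOther]
  · have h1 : (m + 1) % 2 = 0 := by omega
    rw [h1]
    simp

-- B's segment loop over splitF computes keepSpec.
theorem segsB_eq_keepSpec (s : List Char) : ∀ (k pos : Nat) (out : List Char),
    solutionSegsB (splitF s) k pos out = out ++ keepSpec s k pos := by
  induction s with
  | nil =>
    intro k pos out
    simp only [splitF, solutionSegsB, slice2_eq, Option.getD_some, List.drop_nil]
    rw [show everyOther ([] : List Char) = [] from rfl]
    simp [keepSpec]
  | cons c t ih =>
    intro k pos out
    by_cases hc : c = '1'
    · subst hc
      have hsplit : splitF ('1' :: t) = [] :: splitF t := by simp [splitF]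
      rw [hsplit]
      simp only [solutionSegsB, slice2_eq, Option.getD_some, List.drop_nil]
      rw [show everyOther ([] : List Char) = [] from rfl]
      simp only [List.append_nil, List.length_nil, keepSpec, if_pos]
      rw [show pos + 0 + 1 = pos + 1 from rfl]
      exact ih (k + 1) (pos + 1) out
    · rcases ht : splitF t with _ | ⟨p, ps⟩
      · exact absurd ht (splitF_ne_nil t)
      · have hsplit : splitF (c :: t) = (c :: p) :: ps := by simp [splitF, hc, ht]
        rw [hsplit]
        simp only [solutionSegsB, slice2_eq, Option.getD_some]
        simp only [keepSpec, hc, if_false]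
        have hih := ih k (pos + 1) (out ++ (if (k + pos) % 2 = 0 then [c] else []))
        rw [ht] at hih
        simp only [solutionSegsB, slice2_eq, Option.getD_some] at hih
        have hslice : everyOther (List.drop ((k + pos) % 2) (c :: p)) =
            (if (k + pos) % 2 = 0 then [c] else []) ++ everyOther (List.drop ((k + (pos + 1)) % 2) p) := by
          have h := everyOther_drop_cons c p (k + pos)
          rw [show k + pos + 1 = k + (pos + 1) by omega] at h
          exact h
        rw [hslice, ← List.append_assoc]
        rw [show pos + (c :: p).length + 1 = (pos + 1) + p.length + 1 by simp; omega]
        rw [hih]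
        simp [List.append_assoc]

-- A's loop computes keepSpec: its mode is the parity of the ones seen so far.
theorem loopA_eq_keepSpec (s : List Char) : ∀ (i k : Nat) (acc : List Char),
    (solutionLoopA s i (k % 2) acc).2 = acc ++ keepSpec s k i := by
  induction s with
  | nil => intro i k acc; simp [solutionLoopA, keepSpec]
  | cons c t ih =>
    intro i k acc
    by_cases h1 : c = '1'
    · subst h1
      simp only [keepSpec, if_pos]
      rcases Nat.mod_two_eq_zero_or_one k with h | h <;> rw [h]
      · simp only [solutionLoopA]
        rw [if_neg (by simp), if_pos (by simp)]
        have h2 := ih (i + 1) (k + 1) acc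
        rw [show (k + 1) % 2 = 1 by omega] at h2
        exact h2
      · simp only [solutionLoopA]
        rw [if_neg (by simp), if_neg (by simp), if_neg (by simp), if_pos (by simp)]
        have h2 := ih (i + 1) (k + 1) acc
        rw [show (k + 1) % 2 = 0 by omega] at h2
        exact h2
    · simp only [keepSpec, h1, if_false]
      rcases Nat.mod_two_eq_zero_or_one k with h | h <;>
        rcases Nat.mod_two_eq_zero_or_one i with h2 | h2 <;> rw [h]
      · -- k even, i even: A keeps, (k+i) even
        simp only [solutionLoopA]
        rw [if_pos (by exact ⟨by trivial, h1, h2⟩)]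
        rw [if_pos (by omega)]
        have h3 := ih (i + 1) k (acc ++ [c])
        rw [h] at h3
        simpa [List.append_assoc] using h3
      · -- k even, i odd: A skips, (k+i) odd
        simp only [solutionLoopA]
        rw [if_neg (by simp [h1, h2]), if_neg (by simp [h1]), if_neg (by simp), if_neg (by simp)]
        rw [if_neg (by omega)]
        have h3 := ih (i + 1) k acc
        rw [h] at h3
        simpa using h3
      · -- k odd, i even: A skips, (k+i) odd
        simp only [solutionLoopA]
        rw [if_neg (by simp), if_neg (by simp), if_neg (by simp [h1, h2]), if_neg (by simp [h1])]
        rw [if_neg (by omega)]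
        have h3 := ih (i + 1) k acc
        rw [h] at h3
        simpa using h3
      · -- k odd, i odd: A keeps, (k+i) even
        simp only [solutionLoopA]
        rw [if_neg (by simp), if_neg (by simp), if_pos (by exact ⟨by trivial, h1, h2⟩)]
        rw [if_pos (by omega)]
        have h3 := ih (i + 1) k (acc ++ [c])
        rw [h] at h3
        simpa [List.append_assoc] using h3

-- ===== VERDICT (by name: the statement is the Claim_ definition above) =====
theorem solution_spec : Claim_equal_solution := by
  intro code _
  unfold Spec_solution solution solution_alt
  rw [splitOn_eq_splitF, segsB_eq_keepSpec]
  have h := loopA_eq_keepSpec code.toList 0 0 []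
  simp only [Nat.zero_mod] at h
  rw [h]
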